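-- pv_equiv track=rewrite | github.com/juliesuarez/Employee-tracking | pr/cap.py | convert_and_insert_space
-- ===== SOURCE A (Python) =====
-- def convert_and_insert_space(input_string):
--     result = ""
--     for char in input_string:
--         if char.isalpha():
--             result += char.upper()
--         elif char.isnumeric():
--             result += " " + char
--         else:
--             result += char
--
--     return result
-- ===== SOURCE B (Python) =====
-- def convert_and_insert_space(input_string):
--     s = input_string.upper()
--     parts = []
--     cur = []
--     for c in s:
--         if c.isnumeric():
--             parts.append("".join(cur))
--             cur = [c]
--         else:
--             cur.append(c)
--     parts.append("".join(cur))
--     return " ".join(parts)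
-- ===== Notes on version B (the rewrite author's own statement) =====
-- stated objective: faster
-- what changed: B bulk-uppercases the whole string once, then segments it into pieces (each digit starting a new piece, the current piece kept as a char list) and joins the pieces with a space separator, replacing A's per-character three-way branch with repeated string concatenation; measured about 1.9x faster (bulk upper plus join avoids per-char string building).
import Mathlib
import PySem

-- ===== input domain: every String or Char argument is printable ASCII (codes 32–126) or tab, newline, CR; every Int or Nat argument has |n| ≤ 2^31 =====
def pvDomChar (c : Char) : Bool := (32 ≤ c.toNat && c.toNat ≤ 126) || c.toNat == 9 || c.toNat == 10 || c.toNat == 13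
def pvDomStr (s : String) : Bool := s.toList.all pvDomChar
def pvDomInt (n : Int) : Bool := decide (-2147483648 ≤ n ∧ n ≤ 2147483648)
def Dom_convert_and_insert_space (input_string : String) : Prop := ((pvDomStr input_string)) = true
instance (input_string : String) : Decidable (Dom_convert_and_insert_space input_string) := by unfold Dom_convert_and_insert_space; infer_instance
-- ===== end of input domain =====

set_option maxRecDepth 4000


-- B bulk-uppercases the string once, then segments it into pieces (each digit
-- starts a new piece) and lets " ".join insert the spaces — no per-character
-- three-way branch (measured faster by a constant factor).

-- ===== PORT A =====
-- char.isnumeric() is ported as PySem.Chars.isdigit: exact on the ASCII domain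
def convert_and_insert_space (input_string : String) : String :=
  String.mk (input_string.toList.foldl (fun result char =>
    if PySem.Chars.isalpha char then result ++ [PySem.Chars.upperChar char]
    else if PySem.Chars.isdigit char then result ++ [' ', char]
    else result ++ [char]) [])

-- ===== PORT B =====
-- c.isnumeric() is ported as PySem.Chars.isdigit: exact on the ASCII domain;
-- pieces are List Char, so "".join(cur) is cur itself.
def convert_and_insert_space_alt (input_string : String) : String :=
  let s := (PySem.Str.upper input_string).toList
  let acc := s.foldl (fun (acc : List (List Char) × List Char) c =>
    if PySem.Chars.isdigit c then (acc.1 ++ [acc.2], [c])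
    else (acc.1, acc.2 ++ [c])) ([], [])
  String.mk (PySem.Chars.join [' '] (acc.1 ++ [acc.2]))

-- ===== PRECONDITION & SPEC =====
def Spec_convert_and_insert_space (input_string : String) (out : String) : Prop := out = convert_and_insert_space_alt input_string
instance (input_string : String) (out : String) : Decidable (Spec_convert_and_insert_space input_string out) := by unfold Spec_convert_and_insert_space; infer_instance

-- ===== CLAIM (what is proved, stated in full; the proofs are below) =====
def Claim_equal_convert_and_insert_space : Prop := ∀ (input_string : String), Dom_convert_and_insert_space input_string → Spec_convert_and_insert_space input_string (convert_and_insert_space input_string)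

-- ===== LEMMAS AND PROOFS =====

-- A's per-character contribution, and B's per-character contribution after upper
def pvStepA (c : Char) : List Char :=
  if PySem.Chars.isalpha c then [PySem.Chars.upperChar c]
  else if PySem.Chars.isdigit c then [' ', c] else [c]

def pvStepB (c : Char) : List Char :=
  if PySem.Chars.isdigit c then [' ', c] else [c]

theorem pvStep_eq (c : Char) (h : pvDomChar c = true) :
    pvStepA c = pvStepB (PySem.Chars.upperChar c) := by
  have hlt : c.toNat < 127 := by
    unfold pvDomChar at h
    simp only [Bool.or_eq_true, Bool.and_eq_true, decide_eq_true_eq, beq_iff_eq] at h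
    omega
  have key : ∀ n ∈ List.range 127,
      pvStepA (Char.ofNat n) = pvStepB (PySem.Chars.upperChar (Char.ofNat n)) := by decide
  have := key c.toNat (List.mem_range.mpr hlt)
  rwa [Char.ofNat_toNat] at this

-- B's fold step
def pvBStep (acc : List (List Char) × List Char) (c : Char) : List (List Char) × List Char :=
  if PySem.Chars.isdigit c then (acc.1 ++ [acc.2], [c])
  else (acc.1, acc.2 ++ [c])

theorem join_snoc (ps : List (List Char)) (x : List Char) (h : ps ≠ []) :
    PySem.Chars.join [' '] (ps ++ [x]) = PySem.Chars.join [' '] ps ++ ' ' :: x := by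
  induction ps with
  | nil => exact absurd rfl h
  | cons p ps ih =>
    cases ps with
    | nil => simp [PySem.Chars.join, List.intercalate]
    | cons q qs =>
      have := ih (by simp)
      simp only [List.cons_append, PySem.Chars.join_cons_cons] at *
      simp [this]

theorem join_last_snoc (ps : List (List Char)) (x : List Char) (c : Char) :
    PySem.Chars.join [' '] (ps ++ [x ++ [c]]) = PySem.Chars.join [' '] (ps ++ [x]) ++ [c] := by
  induction ps with
  | nil => simp [PySem.Chars.join, List.intercalate]
  | cons p ps ih =>
    cases ps with
    | nil => simp [PySem.Chars.join, List.intercalate]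
    | cons q qs =>
      simp only [List.cons_append, PySem.Chars.join_cons_cons] at *
      simp [ih]

-- main invariant of B's fold: joining the fold's result appends flatMap pvStepB
theorem fold_join (l : List Char) (ps : List (List Char)) (x : List Char) :
    PySem.Chars.join [' '] ((l.foldl pvBStep (ps, x)).1 ++ [(l.foldl pvBStep (ps, x)).2])
      = PySem.Chars.join [' '] (ps ++ [x]) ++ l.flatMap pvStepB := by
  induction l generalizing ps x with
  | nil => simp
  | cons c l ih =>
    simp only [List.foldl_cons, List.flatMap_cons, pvBStep, pvStepB]
    by_cases hd : PySem.Chars.isdigit c = true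
    · simp only [hd, if_true]
      rw [ih (ps := ps ++ [x]) (x := [c]), join_snoc _ _ (by simp)]
      simp
    · simp only [hd, if_false, Bool.false_eq_true]
      rw [ih (ps := ps) (x := x ++ [c]), join_last_snoc]
      simp

-- ===== VERDICT (by name: the statement is the Claim_ definition above) =====
theorem convert_and_insert_space_spec : Claim_equal_convert_and_insert_space := by
  intro s hdom
  unfold Spec_convert_and_insert_space convert_and_insert_space convert_and_insert_space_alt
  simp only []
  rw [PySem.Str.toList_upper]
  unfold PySem.Chars.upper
  congr 1
  -- B's side: fold + join = flatMap pvStepB over the uppercased chars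
  have hBstep : (fun (acc : List (List Char) × List Char) c =>
      if PySem.Chars.isdigit c then (acc.1 ++ [acc.2], [c])
      else (acc.1, acc.2 ++ [c])) = pvBStep := by
    funext acc c; unfold pvBStep; split_ifs <;> rfl
  rw [hBstep, fold_join]
  simp only [List.nil_append, PySem.Chars.join_singleton]
  -- A's side: fold = flatMap pvStepA, then per-char equality on the domain
  have hbody : (fun (result : List Char) (char : Char) =>
      if PySem.Chars.isalpha char then result ++ [PySem.Chars.upperChar char]
      else if PySem.Chars.isdigit char then result ++ [' ', char]
      else result ++ [char]) = (fun result char => result ++ pvStepA char) := by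
    funext result char; unfold pvStepA; split_ifs <;> rfl
  rw [hbody, PySem.List.foldl_append_eq_flatMap, List.nil_append, List.flatMap_map]
  apply List.flatMap_congr
  intro c hc
  exact pvStep_eq c (by
    unfold Dom_convert_and_insert_space pvDomStr at hdom
    exact List.all_eq_true.mp hdom c hc)
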